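-- pv_equiv track=rewrite | github.com/derrickkarake/Cipher_solver | Patterns.py | GwordPattern
-- ===== SOURCE A (Python) =====
-- def GwordPattern(word):
--     word = word.upper()
--     nextNum = 0
--     letterNums = {}
--     wordPattern = []
--
--     for letter in word:
--         if letter not in letterNums:
--             letterNums[letter] = str(nextNum)
--             nextNum += 1
--         wordPattern.append(letterNums[letter])
--     return '.'.join(wordPattern)
-- ===== SOURCE B (Python) =====
-- def GwordPattern(word):
--     w = word.upper()
--     return '.'.join(str(len(set(w[:w.index(c)]))) for c in w)
-- ===== Notes on version B (the rewrite author's own statement) =====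
-- stated objective: alternative
-- what changed: B drops A's incremental counter+dict entirely: each letter's code is computed independently as the number of distinct letters in the prefix strictly before its first occurrence (len(set(w[:w.index(c)]))), a per-character quadratic formula instead of a stateful single scan.
import Mathlib
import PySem

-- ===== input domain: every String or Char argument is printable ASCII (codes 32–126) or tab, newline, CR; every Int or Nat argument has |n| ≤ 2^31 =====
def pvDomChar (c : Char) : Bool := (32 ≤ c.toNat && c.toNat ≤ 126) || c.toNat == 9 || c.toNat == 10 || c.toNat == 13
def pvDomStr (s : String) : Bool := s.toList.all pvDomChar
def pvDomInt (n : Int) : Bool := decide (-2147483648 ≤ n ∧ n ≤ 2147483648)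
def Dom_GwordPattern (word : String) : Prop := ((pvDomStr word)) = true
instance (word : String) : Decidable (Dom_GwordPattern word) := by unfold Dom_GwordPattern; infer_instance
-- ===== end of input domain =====

-- B drops A's stateful counter+dict scan: each letter's code is computed independently as the
-- number of distinct letters strictly before its first occurrence; objective: alternative (O(n^2), stateless).

-- ===== PORT A =====
-- loop body of A's for-loop (state: nextNum, letterNums, wordPattern)
def pvAStep (st : Int × PySem.Dict Char String × List String) (letter : Char) :
    Int × PySem.Dict Char String × List String :=
  let nextNum := st.1
  let letterNums := st.2.1
  let wordPattern := st.2.2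
  let (letterNums, nextNum) :=
    if letterNums.contains letter then (letterNums, nextNum)
    else (letterNums.insert letter (PySem.Int.toStr nextNum), nextNum + 1)
  -- letterNums[letter]: the key is always present here, so getD "" is exact
  (nextNum, letterNums, wordPattern ++ [(letterNums.get? letter).getD ""])

def GwordPattern (word : String) : String :=
  let w := (PySem.Str.upper word).toList
  let st := w.foldl pvAStep (0, PySem.Dict.empty, [])
  PySem.Str.join "." st.2.2

-- ===== PORT B =====
def GwordPattern_alt (word : String) : String :=
  let w := (PySem.Str.upper word).toList
  -- w.index(c): c always occurs in w, so getD 0 is exact; the slice bound is a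
  -- nonnegative in-range Nat, so w[:k] is exactly 'take k'; len(set(..)) = Set.len (Set.ofList ..)
  PySem.Str.join "." (w.map (fun c =>
    PySem.Int.toStr (PySem.Set.len
      (PySem.Set.ofList (w.take ((PySem.List.index? w c).getD 0))))))

-- ===== PRECONDITION & SPEC =====
def Spec_GwordPattern (word : String) (out : String) : Prop := out = GwordPattern_alt word
instance (word : String) (out : String) : Decidable (Spec_GwordPattern word out) := by unfold Spec_GwordPattern; infer_instance

-- ===== CLAIM (what is proved, stated in full; the proofs are below) =====
def Claim_equal_GwordPattern : Prop := ∀ (word : String), Dom_GwordPattern word → Spec_GwordPattern word (GwordPattern word)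

-- ===== LEMMAS AND PROOFS =====

-- the dict A has built after scanning a list with distinct letters o: o enumerated
def pvMapDict (order : List Char) : PySem.Dict Char String :=
  (PySem.List.enumerate order).foldl
    (fun d p => d.insert p.2 (PySem.Int.toStr p.1)) PySem.Dict.empty

theorem pvMapDict_append (o : List Char) (x : Char) :
    pvMapDict (o ++ [x]) = (pvMapDict o).insert x (PySem.Int.toStr o.length) := by
  simp [pvMapDict, PySem.List.enumerate_append, List.foldl_append,
        PySem.List.enumerate_cons, PySem.List.enumerate_nil]

theorem pvKeys_mapDict (o : List Char) (h : o.Nodup) : (pvMapDict o).keys = o := by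
  induction o using List.reverseRecOn with
  | nil => rfl
  | append_singleton l x ih =>
      have hx : x ∉ l := by
        have := h; simp [List.nodup_append] at this; tauto
      have hl : l.Nodup := (List.nodup_append.mp h).1
      have hc : (pvMapDict l).contains x = false := by
        rw [Bool.eq_false_iff]
        rw [Ne, PySem.Dict.contains_iff_mem_keys, ih hl]
        exact hx
      rw [pvMapDict_append, PySem.Dict.keys_insert_of_not_contains _ _ hc, ih hl]

theorem pvContains_mapDict (o : List Char) (h : o.Nodup) (c : Char) :
    (pvMapDict o).contains c = decide (c ∈ o) := by
  rw [PySem.Dict.contains_eq_decide_mem_keys, pvKeys_mapDict o h]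

theorem pvDedup_append (l : List Char) (x : Char) :
    PySem.List.dedup (l ++ [x]) = PySem.Set.add (PySem.List.dedup l) x := by
  simp [PySem.List.dedup_eq_ofList, PySem.Set.ofList_eq_foldl, List.foldl_append]

-- invariant of A's loop: after scanning l the state is (|distinct l|, table over dedup l, mapped output)
theorem pvA_inv (l : List Char) :
    l.foldl pvAStep (0, PySem.Dict.empty, [])
      = (((PySem.List.dedup l).length : Int), pvMapDict (PySem.List.dedup l),
         l.map (fun c => ((pvMapDict (PySem.List.dedup l)).get? c).getD "")) := by
  induction l using List.reverseRecOn with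
  | nil => rfl
  | append_singleton l x ih =>
      rw [List.foldl_append, ih]
      have hnd := PySem.List.nodup_dedup l
      by_cases hx : x ∈ l
      · have hdd : PySem.List.dedup (l ++ [x]) = PySem.List.dedup l := by
          rw [pvDedup_append]
          simp [PySem.Set.add, PySem.Set.contains, hx]
        have hc : (pvMapDict (PySem.List.dedup l)).contains x = true := by
          rw [pvContains_mapDict _ hnd]
          simp [hx]
        simp only [PySem.List.dedup_eq_ofList] at hc hdd ⊢
        simp [pvAStep, hc, hdd]
      · have hxd : x ∉ PySem.List.dedup l := by simp [hx]
        have hdd : PySem.List.dedup (l ++ [x]) = PySem.List.dedup l ++ [x] := by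
          rw [pvDedup_append]
          simp [PySem.Set.add, PySem.Set.contains, hx]
        have hc : (pvMapDict (PySem.List.dedup l)).contains x = false := by
          rw [pvContains_mapDict _ hnd]
          simp [hx]
        rw [hdd]
        simp only [PySem.List.dedup_eq_ofList] at hc hxd ⊢
        rw [pvMapDict_append]
        simp [pvAStep, hc, PySem.Dict.get?_insert_self]
        intro a ha
        rw [PySem.Dict.get?_insert_of_ne _ _ (fun (h : a = x) => hx (h ▸ ha))]

-- looking up c in the table built from a duplicate-free o yields c's position in o
theorem pvMapDict_get (o : List Char) (h : o.Nodup) (c : Char) (k : Nat)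
    (hk : PySem.List.index? o c = some k) :
    (pvMapDict o).get? c = some (PySem.Int.toStr (k : Int)) := by
  induction o using List.reverseRecOn generalizing k with
  | nil => simp [PySem.List.index?_eq_idxOf?] at hk
  | append_singleton l x ih =>
      have hl : l.Nodup := (List.nodup_append.mp h).1
      rw [pvMapDict_append]
      by_cases hc : c ∈ l
      · rw [PySem.List.index?_append_of_mem _ hc] at hk
        have hxl : x ∉ l := by
          have := h; simp [List.nodup_append] at this; tauto
        have hcx : c ≠ x := by
          intro e; exact hxl (e ▸ hc)
        rw [PySem.Dict.get?_insert_of_ne _ _ hcx]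
        exact ih hl k hk
      · have hcx : c = x := by
          have hmem : c ∈ l ++ [x] := by
            rw [← PySem.List.index?_isSome_iff, hk]; rfl
          simpa [hc] using hmem
        subst hcx
        rw [PySem.List.index?_append_singleton_self _ _ hc] at hk
        have : k = l.length := by injection hk with h'; omega
        subst this
        rw [PySem.Dict.get?_insert_self]
  
-- folding Set.add only appends: the starting set is a prefix of the result
theorem pvFoldl_add_prefix (r : List Char) (s : List Char) :
    ∃ t, r.foldl PySem.Set.add s = s ++ t := by
  induction r generalizing s with
  | nil => exact ⟨[], by simp⟩
  | cons a r ih =>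
      by_cases hs : a ∈ s
      · obtain ⟨t, ht⟩ := ih s
        have ha : PySem.Set.add s a = s := by
          simp [PySem.Set.add, PySem.Set.contains, hs]
        exact ⟨t, by simp [List.foldl_cons, ha, ht]⟩
      · obtain ⟨t, ht⟩ := ih (s ++ [a])
        have ha : PySem.Set.add s a = s ++ [a] := by
          simp [PySem.Set.add, PySem.Set.contains, hs]
        exact ⟨a :: t, by simp [List.foldl_cons, ha, ht]⟩
  
-- position of c in dedup w = number of distinct letters before c's first occurrence
theorem pvIndex_dedup (pre suf : List Char) (c : Char) (hc : c ∉ pre) :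
    PySem.List.index? (PySem.List.dedup (pre ++ c :: suf)) c
      = some (PySem.Set.ofList pre).length := by
  have hcs : c ∉ PySem.Set.ofList pre := by
    intro h; exact hc ((PySem.Set.mem_ofList _ _).mp h)
  have hstep : PySem.List.dedup (pre ++ c :: suf)
      = suf.foldl PySem.Set.add (PySem.Set.ofList pre ++ [c]) := by
    have hnot : c ∉ List.foldl PySem.Set.add [] pre := by
      rw [← PySem.Set.ofList_eq_foldl]; exact hcs
    have h2 : PySem.Set.add (List.foldl PySem.Set.add [] pre) c
        = List.foldl PySem.Set.add [] pre ++ [c] := by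
      simp [PySem.Set.add, PySem.Set.contains, hnot]
    simp only [PySem.List.dedup_eq_ofList, PySem.Set.ofList_eq_foldl, List.foldl_append,
               List.foldl_cons, h2]
  obtain ⟨t, ht⟩ := pvFoldl_add_prefix suf (PySem.Set.ofList pre ++ [c])
  rw [hstep, ht,
      PySem.List.index?_append_of_mem t (show c ∈ PySem.Set.ofList pre ++ [c] by simp),
      PySem.List.index?_append_singleton_self _ _ hcs]

-- ===== VERDICT (by name: the statement is the Claim_ definition above) =====
set_option maxHeartbeats 1600000 in
theorem GwordPattern_spec : Claim_equal_GwordPattern := by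
  intro word _
  unfold Spec_GwordPattern GwordPattern GwordPattern_alt
  simp only [pvA_inv]
  congr 1
  apply List.map_congr_left
  intro c hcw
  set w := (PySem.Str.upper word).toList with hw
  obtain ⟨k, hk⟩ := Option.isSome_iff_exists.mp ((PySem.List.index?_isSome_iff w c).mpr hcw)
  obtain ⟨pre, suf, hsplit, hlen, hpre⟩ := (PySem.List.index?_eq_some_iff _ _ _).mp hk
  have htake : w.take k = pre := by
    rw [hsplit, ← hlen, List.take_left]
  have hidx : PySem.List.index? (PySem.List.dedup w) c
      = some (PySem.Set.ofList pre).length := by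
    rw [hsplit]; exact pvIndex_dedup pre suf c hpre
  rw [pvMapDict_get _ (PySem.List.nodup_dedup w) c _ hidx, hk]
  simp [htake, PySem.Set.len]
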